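-- pv_equiv track=rewrite | github.com/sachacapelluto/car-advisor-backend | app/services/rag_service.py | get_priority_columns
-- ===== SOURCE A (Python) =====
-- from typing import List, Dict, Optional
--
-- def get_priority_columns(filters: Dict) -> List[str]:
--     """
--     Get the columns that should be highlighted in comparison table
--     Based on what the user discussed/filtered
--     """
--     priority_columns = ["brand", "model"]  # Always show these first
--
--     # Add columns based on filters used
--     filter_to_column = {
--         "min_price": "price",
--         "max_price": "price",
--         "fuel_type": "fuel_type",
--         "transmission": "transmission",
--         "min_seats": "seats",
--         "color": "color"
--     }
--
--     for filter_key, column_name in filter_to_column.items():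
--         if filter_key in filters and filters[filter_key] is not None:
--             if column_name not in priority_columns:
--                 priority_columns.append(column_name)
--
--     # Add remaining columns
--     all_columns = ["year", "doors", "created_at", "updated_at"]
--     for col in all_columns:
--         if col not in priority_columns:
--             priority_columns.append(col)
--
--     return priority_columns
-- ===== SOURCE B (Python) =====
-- def get_priority_columns(filters):
--     def active(key):
--         return filters.get(key) is not None
--
--     table = [
--         ("brand", True),
--         ("model", True),
--         ("price", active("min_price") or active("max_price")),
--         ("fuel_type", active("fuel_type")),
--         ("transmission", active("transmission")),
--         ("seats", active("min_seats")),
--         ("color", active("color")),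
--         ("year", True),
--         ("doors", True),
--         ("created_at", True),
--         ("updated_at", True),
--     ]
--     return [col for col, keep in table if keep]
-- ===== Notes on version B (the rewrite author's own statement) =====
-- stated objective: simpler
-- what changed: Replaced A's two append-with-membership-dedup loops by one static ordered (column, keep-condition) table filtered in a single comprehension, with each condition a direct filters.get(...) is not None test.
import Mathlib
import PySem

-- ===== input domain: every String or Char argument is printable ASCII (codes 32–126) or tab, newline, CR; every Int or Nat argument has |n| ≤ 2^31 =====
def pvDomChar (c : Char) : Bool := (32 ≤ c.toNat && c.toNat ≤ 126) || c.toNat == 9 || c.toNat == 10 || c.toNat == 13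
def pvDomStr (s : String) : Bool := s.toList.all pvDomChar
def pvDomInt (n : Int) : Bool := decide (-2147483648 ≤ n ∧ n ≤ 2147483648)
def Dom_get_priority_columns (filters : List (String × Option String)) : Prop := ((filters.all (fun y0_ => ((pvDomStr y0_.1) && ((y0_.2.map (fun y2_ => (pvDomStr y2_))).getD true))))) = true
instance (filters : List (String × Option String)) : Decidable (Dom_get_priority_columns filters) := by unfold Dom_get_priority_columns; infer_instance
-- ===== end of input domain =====

-- B replaces A's two append-with-dedup loops by one static ordered (column, keep) table filtered in a single pass (objective: simpler).
-- shared lookup helper: Python's `key in filters and filters[key] is not None` / `filters.get(key) is not None`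
def pvActive (filters : List (String × Option String)) (key : String) : Bool :=
  match (PySem.Dict.mk filters).get? key with
  | some (some _) => true
  | _ => false

-- ===== PORT A =====
def get_priority_columns (filters : List (String × Option String)) : List String :=
  let priority_columns : List String := ["brand", "model"]
  let filter_to_column : List (String × String) :=
    [("min_price", "price"), ("max_price", "price"), ("fuel_type", "fuel_type"),
     ("transmission", "transmission"), ("min_seats", "seats"), ("color", "color")]
  let priority_columns := filter_to_column.foldl
    (fun pc p =>
      if pvActive filters p.1 then
        (if p.2 ∈ pc then pc else pc ++ [p.2])
      else pc) priority_columns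
  let all_columns : List String := ["year", "doors", "created_at", "updated_at"]
  let priority_columns := all_columns.foldl
    (fun pc col => if col ∈ pc then pc else pc ++ [col]) priority_columns
  priority_columns

-- ===== PORT B =====
def get_priority_columns_alt (filters : List (String × Option String)) : List String :=
  let table : List (String × Bool) :=
    [("brand", true), ("model", true),
     ("price", pvActive filters "min_price" || pvActive filters "max_price"),
     ("fuel_type", pvActive filters "fuel_type"),
     ("transmission", pvActive filters "transmission"),
     ("seats", pvActive filters "min_seats"),
     ("color", pvActive filters "color"),
     ("year", true), ("doors", true), ("created_at", true), ("updated_at", true)]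
  (table.filter (fun e => e.2)).map (fun e => e.1)

-- ===== PRECONDITION & SPEC =====
def Spec_get_priority_columns (filters : List (String × Option String)) (out : List String) : Prop := out = get_priority_columns_alt filters
instance (filters : List (String × Option String)) (out : List String) : Decidable (Spec_get_priority_columns filters out) := by unfold Spec_get_priority_columns; infer_instance

-- ===== CLAIM (what is proved, stated in full; the proofs are below) =====
def Claim_equal_get_priority_columns : Prop := ∀ (filters : List (String × Option String)), Dom_get_priority_columns filters → Spec_get_priority_columns filters (get_priority_columns filters)

-- ===== LEMMAS AND PROOFS =====

-- ===== VERDICT (by name: the statement is the Claim_ definition above) =====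
theorem get_priority_columns_spec : Claim_equal_get_priority_columns := by
  intro filters _
  unfold Spec_get_priority_columns
  cases h1 : pvActive filters "min_price" <;>
  cases h2 : pvActive filters "max_price" <;>
  cases h3 : pvActive filters "fuel_type" <;>
  cases h4 : pvActive filters "transmission" <;>
  cases h5 : pvActive filters "min_seats" <;>
  cases h6 : pvActive filters "color" <;>
  simp [get_priority_columns, get_priority_columns_alt, h1, h2, h3, h4, h5, h6]
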